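-- pv_equiv track=rewrite | github.com/rahul2002m/Algo_Visualizer | Algo_Visualizer.py | clrarr
-- ===== SOURCE A (Python) =====
-- def clrarr(data, low, mid, high):
--     clr = []
--     for i in range(len(data)):
--         if i == mid:
--             clr.append('yellow')
--         elif i == low or i == high:
--             clr.append('blue')
--         else:
--             clr.append('red')
--     return clr
-- ===== SOURCE B (Python) =====
-- def clrarr(data, low, mid, high):
--     clr = ['red'] * len(data)
--     n = len(data)
--     if 0 <= low < n:
--         clr[low] = 'blue'
--     if 0 <= high < n:
--         clr[high] = 'blue'
--     if 0 <= mid < n: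
--         clr[mid] = 'yellow'
--     return clr
-- ===== Notes on version B (the rewrite author's own statement) =====
-- stated objective: simpler
-- what changed: Replaces the per-element if/elif classification loop with a default 'red' fill plus three bounds-guarded targeted assignments (blue at low/high, yellow at mid last so mid wins ties).
import Mathlib
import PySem

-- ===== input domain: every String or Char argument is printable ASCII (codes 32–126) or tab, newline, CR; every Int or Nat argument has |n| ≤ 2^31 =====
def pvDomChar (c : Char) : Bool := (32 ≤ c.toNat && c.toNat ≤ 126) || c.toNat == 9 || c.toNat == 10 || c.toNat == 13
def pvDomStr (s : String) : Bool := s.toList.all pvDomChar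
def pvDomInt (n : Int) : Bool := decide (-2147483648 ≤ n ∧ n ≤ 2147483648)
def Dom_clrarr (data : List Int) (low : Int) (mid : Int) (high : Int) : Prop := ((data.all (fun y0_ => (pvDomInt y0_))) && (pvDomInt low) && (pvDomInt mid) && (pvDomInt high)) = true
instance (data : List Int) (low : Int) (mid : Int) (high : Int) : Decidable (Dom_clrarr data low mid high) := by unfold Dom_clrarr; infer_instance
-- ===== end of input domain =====

-- B replaces the per-element if/elif loop with a default 'red' fill plus three
-- bounds-guarded targeted writes (blue at low/high, then yellow at mid): simpler.

-- ===== PORT A =====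
def clrarr (data : List Int) (low : Int) (mid : Int) (high : Int) : List String :=
  (PySem.List.pyRange 0 data.length 1).foldl
    (fun clr i =>
      if i == mid then clr ++ ["yellow"]
      else if i == low || i == high then clr ++ ["blue"]
      else clr ++ ["red"])
    []

-- ===== PORT B =====
-- guarded 'clr[idx] = c' (B's own code: the Python assignment after the bounds test)
def pvSetIf (clr : List String) (idx : Int) (c : String) : List String :=
  if 0 ≤ idx ∧ idx < (clr.length : Int) then clr.set idx.toNat c else clr

def clrarr_alt (data : List Int) (low : Int) (mid : Int) (high : Int) : List String :=
  pvSetIf (pvSetIf (pvSetIf (List.replicate data.length "red") low "blue") high "blue") mid "yellow"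

-- ===== PRECONDITION & SPEC =====
def Spec_clrarr (data : List Int) (low : Int) (mid : Int) (high : Int) (out : List String) : Prop := out = clrarr_alt data low mid high
instance (data : List Int) (low : Int) (mid : Int) (high : Int) (out : List String) : Decidable (Spec_clrarr data low mid high out) := by unfold Spec_clrarr; infer_instance

-- ===== CLAIM (what is proved, stated in full; the proofs are below) =====
def Claim_equal_clrarr : Prop := ∀ (data : List Int) (low : Int) (mid : Int) (high : Int), Dom_clrarr data low mid high → Spec_clrarr data low mid high (clrarr data low mid high)

-- ===== LEMMAS AND PROOFS =====

theorem clrarr_eq_map (data : List Int) (low mid high : Int) :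
    clrarr data low mid high =
      (PySem.List.pyRange 0 data.length 1).map
        (fun i => if i == mid then "yellow" else if i == low || i == high then "blue" else "red") := by
  unfold clrarr
  rw [show (fun (clr : List String) (i : Int) =>
      if i == mid then clr ++ ["yellow"]
      else if i == low || i == high then clr ++ ["blue"]
      else clr ++ ["red"]) =
      (fun (clr : List String) (i : Int) =>
        clr ++ [if i == mid then "yellow" else if i == low || i == high then "blue" else "red"])
      from by funext clr i; split_ifs <;> rfl]
  rw [PySem.List.foldl_append_singleton_eq_map]
  simp

theorem length_clrarr_alt (data : List Int) (low mid high : Int) :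
    (clrarr_alt data low mid high).length = data.length := by
  unfold clrarr_alt pvSetIf
  split_ifs <;> simp

theorem getElem_pvSetIf (l : List String) (idx : Int) (c : String) (k : Nat)
    (hk : k < (pvSetIf l idx c).length) (hk' : k < l.length) :
    (pvSetIf l idx c)[k] = if idx = (k : Int) then c else l[k] := by
  unfold pvSetIf at hk ⊢
  by_cases h : 0 ≤ idx ∧ idx < (l.length : Int)
  · simp only [if_pos h] at hk ⊢
    rw [List.getElem_set]
    by_cases he : idx = (k : Int)
    · rw [if_pos (by omega), if_pos he]
    · rw [if_neg (by omega), if_neg he]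
  · simp only [if_neg h] at hk ⊢
    exact (if_neg (show ¬(idx = (k : Int)) by omega)).symm

theorem length_pvSetIf (l : List String) (idx : Int) (c : String) :
    (pvSetIf l idx c).length = l.length := by
  unfold pvSetIf; split_ifs <;> simp

theorem getElem_clrarr_alt (data : List Int) (low mid high : Int) (k : Nat)
    (hk : k < (clrarr_alt data low mid high).length) :
    (clrarr_alt data low mid high)[k] =
      (if (k : Int) == mid then "yellow" else if (k : Int) == low || (k : Int) == high then "blue" else "red") := by
  have hlen := length_clrarr_alt data low mid high
  have hk0 : k < data.length := by omega
  unfold clrarr_alt at *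
  rw [getElem_pvSetIf _ _ _ _ hk (by simp [length_pvSetIf]; omega),
      getElem_pvSetIf _ _ _ _ _ (by simp [length_pvSetIf]; omega),
      getElem_pvSetIf _ _ _ _ _ (by simpa using hk0)]
  simp only [List.getElem_replicate, beq_iff_eq, Bool.or_eq_true]
  split_ifs <;> first | rfl | omega

theorem clrarr_spec' (data : List Int) (low mid high : Int) :
    clrarr data low mid high = clrarr_alt data low mid high := by
  rw [clrarr_eq_map]
  apply List.ext_getElem
  · simp [length_clrarr_alt, PySem.List.length_pyRange_one]
  · intro k h1 h2
    rw [getElem_clrarr_alt]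
    simp only [List.getElem_map, PySem.List.getElem_pyRange_one]
    norm_num

-- ===== VERDICT (by name: the statement is the Claim_ definition above) =====
theorem clrarr_spec : Claim_equal_clrarr := by
  intro data low mid high _
  unfold Spec_clrarr
  exact clrarr_spec' data low mid high
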